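-- pv_equiv track=rewrite | github.com/rsasaki0109/localization_zoo | evaluation/scripts/run_experiment_matrix.py | split_flag_surface
-- ===== SOURCE A (Python) =====
-- def split_flag_surface(args: list[str]) -> tuple[int, int]:
--     flag_count = 0
--     valued_flag_count = 0
--     i = 0
--     while i < len(args):
--         arg = args[i]
--         if arg.startswith("--"):
--             flag_count += 1
--             if "=" in arg:
--                 valued_flag_count += 1
--             elif i + 1 < len(args) and not args[i + 1].startswith("--"):
--                 valued_flag_count += 1
--                 i += 1
--         i += 1
--     return flag_count, valued_flag_count
-- ===== SOURCE B (Python) =====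
-- def split_flag_surface(args: list[str]) -> tuple[int, int]:
--     flag_count = sum(1 for a in args if a.startswith("--"))
--     nexts = [*args[1:], None]
--     valued_flag_count = sum(
--         1
--         for a, nxt in zip(args, nexts)
--         if a.startswith("--")
--         and ("=" in a or (nxt is not None and not nxt.startswith("--")))
--     )
--     return flag_count, valued_flag_count
-- ===== Notes on version B (the rewrite author's own statement) =====
-- stated objective: simpler
-- what changed: Replaced the stateful while loop (mutable index, value-consumption skip via i += 1) with two stateless linear counting passes: one comprehension counts flags, another over zip(args, shifted-args) judges each flag independently by its own successor; this is valid because a consumed value never starts with '--', so skipping it never changes either count.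
import Mathlib
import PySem

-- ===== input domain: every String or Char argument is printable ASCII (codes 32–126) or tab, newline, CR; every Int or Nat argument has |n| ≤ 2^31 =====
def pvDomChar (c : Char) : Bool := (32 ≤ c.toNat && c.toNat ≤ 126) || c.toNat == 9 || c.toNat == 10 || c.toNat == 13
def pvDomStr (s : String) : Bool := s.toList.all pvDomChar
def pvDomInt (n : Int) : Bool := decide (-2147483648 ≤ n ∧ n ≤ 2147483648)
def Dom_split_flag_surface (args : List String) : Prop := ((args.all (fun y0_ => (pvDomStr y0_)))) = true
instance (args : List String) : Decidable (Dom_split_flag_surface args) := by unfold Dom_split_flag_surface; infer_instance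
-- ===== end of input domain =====

-- B replaces A's stateful while loop (mutable index with value-consumption skip) by two
-- stateless counting passes; objective: simpler, same O(n) cost.

-- ===== PORT A =====
-- the while loop: state (flag_count, valued_flag_count, the suffix of args from index i);
-- the i += 1 inside the elif becomes recursing on rest' (skipping the consumed value)
def splitA_loop (fc vc : Int) : List String → Int × Int
  | [] => (fc, vc)
  | arg :: rest =>
    if PySem.Str.startswith arg "--" then
      if PySem.Str.isIn "=" arg then
        splitA_loop (fc + 1) (vc + 1) rest
      else
        match rest with
        | nxt :: rest' =>
          if !PySem.Str.startswith nxt "--" then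
            splitA_loop (fc + 1) (vc + 1) rest'
          else
            splitA_loop (fc + 1) vc (nxt :: rest')
        | [] => splitA_loop (fc + 1) vc []
    else
      splitA_loop fc vc rest

def split_flag_surface (args : List String) : Int × Int :=
  splitA_loop 0 0 args

-- ===== PORT B =====
-- Source B: flag_count = sum(1 for a in args if a.startswith("--"));
-- nexts = [*args[1:], None]; valued = sum over zip(args, nexts)   (args[1:] on a list is drop 1, exact)
def split_flag_surface_alt (args : List String) : Int × Int :=
  let flag_count : Int := (args.countP (fun a => PySem.Str.startswith a "--") : Nat)
  let nexts : List (Option String) := (args.drop 1).map some ++ [none]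
  let valued : Int := ((args.zip nexts).countP (fun p =>
      PySem.Str.startswith p.1 "--" &&
        (PySem.Str.isIn "=" p.1 ||
          (match p.2 with
           | some nxt => !PySem.Str.startswith nxt "--"
           | none => false))) : Nat)
  (flag_count, valued)

-- ===== PRECONDITION & SPEC =====
def Spec_split_flag_surface (args : List String) (out : Int × Int) : Prop := out = split_flag_surface_alt args
instance (args : List String) (out : Int × Int) : Decidable (Spec_split_flag_surface args out) := by unfold Spec_split_flag_surface; infer_instance

-- ===== CLAIM (what is proved, stated in full; the proofs are below) =====
def Claim_equal_split_flag_surface : Prop := ∀ (args : List String), Dom_split_flag_surface args → Spec_split_flag_surface args (split_flag_surface args)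

-- ===== LEMMAS AND PROOFS =====

-- abbreviations for the two counts of B's port
def pvSw (a : String) : Bool := PySem.Str.startswith a "--"

def pvPred (p : String × Option String) : Bool :=
  PySem.Str.startswith p.1 "--" &&
    (PySem.Str.isIn "=" p.1 ||
      (match p.2 with
       | some nxt => !PySem.Str.startswith nxt "--"
       | none => false))

def pvCntF (l : List String) : Int := (l.countP (fun a => PySem.Str.startswith a "--") : Nat)

def pvCntV (l : List String) : Int := ((l.zip ((l.drop 1).map some ++ [none])).countP pvPred : Nat)

theorem pvCntF_cons (a : String) (rest : List String) :
    pvCntF (a :: rest) = (if pvSw a then 1 else 0) + pvCntF rest := by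
  simp only [pvCntF, pvSw, List.countP_cons]
  split <;> simp <;> omega

theorem pvCntV_cons (a : String) (rest : List String) :
    pvCntV (a :: rest) = (if pvPred (a, rest.head?) then 1 else 0) + pvCntV rest := by
  cases rest with
  | nil => simp [pvCntV]
  | cons b rest' =>
    simp only [pvCntV, List.drop_succ_cons, List.drop_zero, List.map_cons, List.cons_append,
      List.zip_cons_cons, List.countP_cons, List.head?_cons]
    split <;> simp <;> omega

theorem pvCntF_nil : pvCntF [] = 0 := by simp [pvCntF]

theorem pvCntV_nil : pvCntV [] = 0 := by simp [pvCntV]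

theorem splitA_loop_eq (fc vc : Int) (l : List String) :
    splitA_loop fc vc l = (fc + pvCntF l, vc + pvCntV l) := by
  fun_induction splitA_loop fc vc l <;>
    simp_all [pvCntF_cons, pvCntV_cons, pvCntF_nil, pvCntV_nil, pvSw, pvPred] <;>
    omega

theorem alt_eq (args : List String) :
    split_flag_surface_alt args = (pvCntF args, pvCntV args) := rfl

-- ===== VERDICT (by name: the statement is the Claim_ definition above) =====
theorem split_flag_surface_spec : Claim_equal_split_flag_surface := by
  intro args _
  unfold Spec_split_flag_surface split_flag_surface
  rw [splitA_loop_eq, alt_eq]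
  simp
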